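-- pv_equiv track=rewrite | github.com/gudipudiprashant/ir-project | java_handler.py | make_proper_sent_tokens_list
-- ===== SOURCE A (Python) =====
-- def make_proper_sent_tokens_list(sent_token_list):
--   sent_list = []
--   pos_ctr = 1
--   for sent in sent_token_list:
--     temp_list = []
--     for i, word_dict in enumerate(sent):
--       sent[i] = (word_dict["tokentext"], word_dict.get("netype", "O"), pos_ctr)
--       pos_ctr += 1
--       temp_list.append(sent[i][0])
--     sent_list.append(temp_list)
--   return sent_list
-- ===== SOURCE B (Python) =====
-- # Return value only: B does not mutate the input (Python A rewrites each word
-- # dict into a tuple in place); the position counter does not affect the result.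
-- def make_proper_sent_tokens_list(sent_token_list):
--     def sent_words(sent):
--         # recursion on the word list, building the result by cons
--         if not sent:
--             return []
--         return [sent[0]["tokentext"]] + sent_words(sent[1:])
--
--     # recursion on the sentence list
--     if not sent_token_list:
--         return []
--     return [sent_words(sent_token_list[0])] + \
--         make_proper_sent_tokens_list(sent_token_list[1:])
-- ===== Notes on version B (the rewrite author's own statement) =====
-- stated objective: alternative
-- what changed: B replaces A's interleaved iterative loop (running position counter, tuple construction, in-place mutation, list appends) by structural recursion on head/rest that builds the result by consing 'tokentext' extractions; return value only, B does not mutate the input.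
import Mathlib
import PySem

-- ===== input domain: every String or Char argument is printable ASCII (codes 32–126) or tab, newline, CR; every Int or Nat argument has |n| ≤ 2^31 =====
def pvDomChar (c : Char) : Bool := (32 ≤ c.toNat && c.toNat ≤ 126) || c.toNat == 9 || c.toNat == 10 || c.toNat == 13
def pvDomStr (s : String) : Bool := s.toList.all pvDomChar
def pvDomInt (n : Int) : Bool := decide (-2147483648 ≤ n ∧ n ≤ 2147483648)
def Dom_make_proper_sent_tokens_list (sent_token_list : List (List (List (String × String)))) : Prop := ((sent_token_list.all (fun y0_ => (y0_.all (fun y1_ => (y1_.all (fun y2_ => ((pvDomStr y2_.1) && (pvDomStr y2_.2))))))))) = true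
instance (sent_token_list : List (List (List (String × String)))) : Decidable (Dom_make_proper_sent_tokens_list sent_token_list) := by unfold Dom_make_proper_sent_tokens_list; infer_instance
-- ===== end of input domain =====

-- B replaces A's interleaved iterative loop (position counter, tuple construction, in-place
-- mutation of the argument, appends) by structural recursion on head/rest building the result
-- by cons; return value only — B does not mutate its argument, while Python A rewrites each
-- word dict into a tuple in place.


-- ===== PORT A =====
-- literal port of A: outer foldl over sentences carrying (sent_list, pos_ctr); inner foldl over
-- the words of a sentence carrying (temp_list, pos_ctr); the tuple A stores back into the mutated
-- sentence is built as 'entry' and its first component appended to temp_list.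
-- word_dict["tokentext"] raises KeyError when absent: Pre_ excludes that, '.getD ""' is unreachable there.
def make_proper_sent_tokens_list (sent_token_list : List (List (List (String × String)))) : List (List String) :=
  (sent_token_list.foldl
    (fun (st : List (List String) × Int) sent =>
      let r := sent.foldl
        (fun (s : List String × Int) word_dict =>
          let entry : String × String × Int :=
            (((PySem.Dict.mk word_dict).get? "tokentext").getD "",
             (PySem.Dict.mk word_dict).getD "netype" "O", s.2)
          (s.1 ++ [entry.1], s.2 + 1))
        ([], st.2)
      (st.1 ++ [r.1], r.2))
    ([], 1)).1

-- ===== PORT B =====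
-- structural recursion on the word list: cons tokentext of the head onto the recursion on the tail
def pvAltSentWords : List (List (String × String)) → List String
  | [] => []
  | word_dict :: rest =>
      (((PySem.Dict.mk word_dict).get? "tokentext").getD "") :: pvAltSentWords rest

-- structural recursion on the sentence list
def make_proper_sent_tokens_list_alt : List (List (List (String × String))) → List (List String)
  | [] => []
  | sent :: rest => pvAltSentWords sent :: make_proper_sent_tokens_list_alt rest

-- ===== PRECONDITION & SPEC =====
-- Pre_ excludes exactly the inputs on which Python A raises KeyError: a word dict without "tokentext".
def Pre_make_proper_sent_tokens_list (sent_token_list : List (List (List (String × String)))) : Prop :=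
  ∀ sent ∈ sent_token_list, ∀ word_dict ∈ sent, (PySem.Dict.mk word_dict).contains "tokentext" = true
instance (sent_token_list : List (List (List (String × String)))) : Decidable (Pre_make_proper_sent_tokens_list sent_token_list) := by unfold Pre_make_proper_sent_tokens_list; infer_instance

def pvWitness_make_proper_sent_tokens_list : (List (List (List (String × String)))) :=
  [[[("tokentext", "The"), ("netype", "PER")], [("tokentext", "cat")]], [], [[("tokentext", "sat")]]]

def Spec_make_proper_sent_tokens_list (sent_token_list : List (List (List (String × String)))) (out : List (List String)) : Prop := out = make_proper_sent_tokens_list_alt sent_token_list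
instance (sent_token_list : List (List (List (String × String)))) (out : List (List String)) : Decidable (Spec_make_proper_sent_tokens_list sent_token_list out) := by unfold Spec_make_proper_sent_tokens_list; infer_instance

-- ===== CLAIM =====
def Claim_equal_make_proper_sent_tokens_list : Prop := ∀ (sent_token_list : List (List (List (String × String)))), Dom_make_proper_sent_tokens_list sent_token_list → Pre_make_proper_sent_tokens_list sent_token_list → Spec_make_proper_sent_tokens_list sent_token_list (make_proper_sent_tokens_list sent_token_list)

-- ===== LEMMAS AND PROOFS =====

-- A's inner word loop appends exactly the words pvAltSentWords computes and advances pos by the length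
lemma inner_loop_eq (sent : List (List (String × String))) (acc : List String) (pos : Int) :
    sent.foldl
      (fun (s : List String × Int) word_dict =>
        let entry : String × String × Int :=
          (((PySem.Dict.mk word_dict).get? "tokentext").getD "",
           (PySem.Dict.mk word_dict).getD "netype" "O", s.2)
        (s.1 ++ [entry.1], s.2 + 1))
      (acc, pos)
    = (acc ++ pvAltSentWords sent, pos + sent.length) := by
  induction sent generalizing acc pos with
  | nil => simp [pvAltSentWords]
  | cons wd rest ih => simp [List.foldl_cons, ih, pvAltSentWords]; omega

-- A's outer loop, after the inner loop is rewritten, produces acc followed by B's recursion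
lemma outer_loop_eq (stl : List (List (List (String × String)))) (acc : List (List String)) (pos : Int) :
    (stl.foldl
      (fun (st : List (List String) × Int) sent =>
        (st.1 ++ [pvAltSentWords sent], st.2 + (sent.length : Int)))
      (acc, pos)).1
    = acc ++ make_proper_sent_tokens_list_alt stl := by
  induction stl generalizing acc pos with
  | nil => simp [make_proper_sent_tokens_list_alt]
  | cons sent rest ih =>
      simp [List.foldl_cons, make_proper_sent_tokens_list_alt, ih]

-- ===== VERDICT =====
theorem make_proper_sent_tokens_list_spec : Claim_equal_make_proper_sent_tokens_list := by
  intro stl _ _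
  show make_proper_sent_tokens_list stl = make_proper_sent_tokens_list_alt stl
  unfold make_proper_sent_tokens_list
  have hfun :
      (fun (st : List (List String) × Int) (sent : List (List (String × String))) =>
        let r := sent.foldl
          (fun (s : List String × Int) word_dict =>
            let entry : String × String × Int :=
              (((PySem.Dict.mk word_dict).get? "tokentext").getD "",
               (PySem.Dict.mk word_dict).getD "netype" "O", s.2)
            (s.1 ++ [entry.1], s.2 + 1))
          ([], st.2)
        (st.1 ++ [r.1], r.2))
      = (fun (st : List (List String) × Int) sent =>
          (st.1 ++ [pvAltSentWords sent], st.2 + (sent.length : Int))) := by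
    funext st sent
    simp [inner_loop_eq]
  rw [hfun]
  simpa using outer_loop_eq stl [] 1
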